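-- pv_equiv track=rewrite | github.com/m-nt/Celestial-Verse | scripts/tools.py | return_types_from_tokenIds
-- ===== SOURCE A (Python) =====
-- CELESTIAL_TYPES = {1: 10, 2: 15, 3: 16}
--
-- def return_types_from_tokenIds(tokenIds: list) -> list:
--     types = []
--     for i in tokenIds:
--         if i <= CELESTIAL_TYPES[1]:
--             types.append(1)
--         elif i <= CELESTIAL_TYPES[2]:
--             types.append(2)
--         else:
--             types.append(3)
--     return types
-- ===== SOURCE B (Python) =====
-- CELESTIAL_TYPES = {1: 10, 2: 15, 3: 16}
-- # staged promotion table: everyone starts as type 1; ids above a bound are promoted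
-- PROMOTIONS = ((2, CELESTIAL_TYPES[1]), (3, CELESTIAL_TYPES[2]))  # ((2, 10), (3, 15))
--
-- def return_types_from_tokenIds(tokenIds: list) -> list:
--     types = [1] * len(tokenIds)
--     for t, bound in PROMOTIONS:
--         types = [t if v > bound else old for old, v in zip(types, tokenIds)]
--     return types
-- ===== Notes on version B (the rewrite author's own statement) =====
-- stated objective: alternative
-- what changed: Instead of classifying each id once through an if/elif/else chain into an accumulator, B initialises every slot to type 1 and then runs staged relabelling passes driven by a promotion table, overwriting a slot with the higher type whenever its id exceeds that stage's bound.
import Mathlib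
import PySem

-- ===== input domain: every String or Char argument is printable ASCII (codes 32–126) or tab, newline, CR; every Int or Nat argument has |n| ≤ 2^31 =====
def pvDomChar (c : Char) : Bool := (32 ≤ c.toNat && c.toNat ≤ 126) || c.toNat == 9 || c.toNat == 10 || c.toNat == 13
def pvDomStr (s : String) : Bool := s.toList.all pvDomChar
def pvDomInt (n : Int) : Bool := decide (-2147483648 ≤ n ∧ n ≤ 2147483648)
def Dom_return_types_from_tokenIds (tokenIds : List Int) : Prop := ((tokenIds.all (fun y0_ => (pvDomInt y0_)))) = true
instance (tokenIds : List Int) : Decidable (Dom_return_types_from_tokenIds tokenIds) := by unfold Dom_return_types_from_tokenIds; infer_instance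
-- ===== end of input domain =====

-- B replaces the per-element if/elif/else classification with staged relabelling
-- passes over a promotion table (alternative decomposition; same cost).

-- ===== PORT A =====
-- CELESTIAL_TYPES = {1: 10, 2: 15, 3: 16}
def CELESTIAL_TYPES : PySem.Dict Int Int := PySem.Dict.ofList [(1, 10), (2, 15), (3, 16)]

def return_types_from_tokenIds (tokenIds : List Int) : List Int :=
  tokenIds.foldl (fun types i =>
    if i ≤ PySem.Dict.getD CELESTIAL_TYPES 1 0 then types ++ [1]
    else if i ≤ PySem.Dict.getD CELESTIAL_TYPES 2 0 then types ++ [2]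
    else types ++ [3]) []

-- ===== PORT B =====
-- PROMOTIONS = ((2, CELESTIAL_TYPES[1]), (3, CELESTIAL_TYPES[2]))
def PROMOTIONS : List (Int × Int) :=
  [(2, PySem.Dict.getD CELESTIAL_TYPES 1 0), (3, PySem.Dict.getD CELESTIAL_TYPES 2 0)]

def return_types_from_tokenIds_alt (tokenIds : List Int) : List Int :=
  PROMOTIONS.foldl
    (fun types tb =>
      (types.zip tokenIds).map (fun ov => if ov.2 > tb.2 then tb.1 else ov.1))
    (List.replicate tokenIds.length 1)

-- ===== PRECONDITION & SPEC =====
def Spec_return_types_from_tokenIds (tokenIds : List Int) (out : List Int) : Prop := out = return_types_from_tokenIds_alt tokenIds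
instance (tokenIds : List Int) (out : List Int) : Decidable (Spec_return_types_from_tokenIds tokenIds out) := by unfold Spec_return_types_from_tokenIds; infer_instance

-- ===== CLAIM (what is proved, stated in full; the proofs are below) =====
def Claim_equal_return_types_from_tokenIds : Prop := ∀ (tokenIds : List Int), Dom_return_types_from_tokenIds tokenIds → Spec_return_types_from_tokenIds tokenIds (return_types_from_tokenIds tokenIds)

-- ===== LEMMAS AND PROOFS =====
-- the per-element value both programs end up with
def pvClassify (i : Int) : Int := if i ≤ 10 then 1 else if i ≤ 15 then 2 else 3

-- A's fold, from any accumulator, appends the classified values.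
theorem fold_eq_acc (tokenIds : List Int) (acc : List Int) :
    tokenIds.foldl (fun types i =>
      if i ≤ PySem.Dict.getD CELESTIAL_TYPES 1 0 then types ++ [1]
      else if i ≤ PySem.Dict.getD CELESTIAL_TYPES 2 0 then types ++ [2]
      else types ++ [3]) acc = acc ++ tokenIds.map pvClassify := by
  induction tokenIds generalizing acc with
  | nil => simp
  | cons x xs ih =>
    have h10 : PySem.Dict.getD CELESTIAL_TYPES 1 0 = 10 := by decide
    have h15 : PySem.Dict.getD CELESTIAL_TYPES 2 0 = 15 := by decide
    simp only [List.foldl_cons, List.map_cons, ih, pvClassify]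
    rw [h10, h15]
    split_ifs <;> simp

-- B's two staged passes produce the classified values.
theorem alt_eq_map (tokenIds : List Int) :
    return_types_from_tokenIds_alt tokenIds = tokenIds.map pvClassify := by
  unfold return_types_from_tokenIds_alt PROMOTIONS
  have h10 : PySem.Dict.getD CELESTIAL_TYPES 1 0 = 10 := by decide
  have h15 : PySem.Dict.getD CELESTIAL_TYPES 2 0 = 15 := by decide
  simp only [List.foldl_cons, List.foldl_nil, h10, h15]
  induction tokenIds with
  | nil => simp
  | cons x xs ih =>
    simp only [List.length_cons, List.replicate_succ, List.zip_cons_cons, List.map_cons, ih,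
      List.map_cons, pvClassify]
    congr 1
    split_ifs <;> omega

-- ===== VERDICT (by name: the statement is the Claim_ definition above) =====
theorem return_types_from_tokenIds_spec : Claim_equal_return_types_from_tokenIds := by
  intro tokenIds _
  unfold Spec_return_types_from_tokenIds return_types_from_tokenIds
  rw [alt_eq_map]
  simpa using fold_eq_acc tokenIds []
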